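-- pv_equiv track=rewrite | github.com/CareStack-LLC/CommonGround-DEV1 | cg-v1.110.26/backend/app/services/feature_gate.py | get_required_tier
-- ===== SOURCE A (Python) =====
-- from typing import TYPE_CHECKING, Optional, Union
--
-- FEATURE_DEFINITIONS = {
--     # ARIA Features
--     "aria_manual_sentiment": ["starter", "plus", "family_plus"],  # All tiers
--     "aria_advanced": ["family_plus"],  # Premium only
--
--     # ClearFund Features
--     "clearfund_fee_exempt": ["plus", "family_plus"],  # Paid tiers exempt from $1.50 fee
--
--     # QuickAccords
--     "quick_accords": ["plus", "family_plus"],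
--
--     # Scheduling & Automation
--     "auto_scheduling": ["plus", "family_plus"],
--     "custody_dashboard": ["plus", "family_plus"],
--     "pdf_summaries": ["plus", "family_plus"],
--
--     # Circle / Trusted Contacts (numeric limit)
--     "circle_contacts_limit": {
--         "starter": 0,
--         "plus": 1,
--         "family_plus": 5,
--     },
--
--     # KidsCom Features
--     "kidcoms_access": ["family_plus"],
--     "theater_mode": ["family_plus"],
--
--     # Parent Calls (co-parent communication)
--     "parent_voice_call": ["plus", "family_plus"],
--     "parent_video_call": ["family_plus"],
--
--     # Court & Reporting
--     "court_reporting": ["family_plus"],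
--
--     # TimeBridge / Calendar
--     "silent_handoff_gps": ["starter", "plus", "family_plus"],  # All tiers
--     "timebridge_calendar": ["starter", "plus", "family_plus"],  # All tiers
--     "timebridge_manual_only": {  # True = manual only, False = auto features
--         "starter": True,
--         "plus": False,
--         "family_plus": False,
--     },
-- }
--
-- TIER_HIERARCHY = {
--     "starter": 0,
--     "plus": 1,
--     "family_plus": 2,
-- }
--
-- def get_required_tier(feature: str) -> Optional[str]:
--     """
--     Get the minimum tier required for a feature.
--
--     Args:
--         feature: Feature name from FEATURE_DEFINITIONS
--
--     Returns:
--         Minimum required tier name, or None if feature doesn't exist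
--     """
--     if feature not in FEATURE_DEFINITIONS:
--         return None
--
--     feature_def = FEATURE_DEFINITIONS[feature]
--
--     # For boolean features, find the lowest tier in the list
--     if isinstance(feature_def, list):
--         if not feature_def:
--             return None
--         # Sort by hierarchy and return lowest
--         sorted_tiers = sorted(
--             feature_def,
--             key=lambda t: TIER_HIERARCHY.get(t, 999)
--         )
--         return sorted_tiers[0]
--
--     # For numeric features, find lowest tier with positive value
--     if isinstance(feature_def, dict):
--         for tier in ["starter", "plus", "family_plus"]:
--             value = feature_def.get(tier, 0)
--             if isinstance(value, bool):
--                 if value: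
--                     return tier
--             elif value > 0:
--                 return tier
--         return None
--
--     return None
-- ===== SOURCE B (Python) =====
-- from typing import Optional
--
-- # The feature catalogue is a fixed module constant, so the minimum tier for each
-- # feature is a constant too: precompute it once as a direct lookup table instead
-- # of re-deriving it (sort / tier scan) on every call.
-- REQUIRED_TIER = {
--     "aria_manual_sentiment": "starter",
--     "aria_advanced": "family_plus",
--     "clearfund_fee_exempt": "plus",
--     "quick_accords": "plus",
--     "auto_scheduling": "plus",
--     "custody_dashboard": "plus",
--     "pdf_summaries": "plus",
--     "circle_contacts_limit": "plus",
--     "kidcoms_access": "family_plus",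
--     "theater_mode": "family_plus",
--     "parent_voice_call": "plus",
--     "parent_video_call": "family_plus",
--     "court_reporting": "family_plus",
--     "silent_handoff_gps": "starter",
--     "timebridge_calendar": "starter",
--     "timebridge_manual_only": "starter",
-- }
--
--
-- def get_required_tier(feature: str) -> Optional[str]:
--     return REQUIRED_TIER.get(feature)
-- ===== Notes on version B (the rewrite author's own statement) =====
-- stated objective: simpler
-- what changed: B replaces A's per-call computation (sorting the tier list by hierarchy, or scanning the numeric dict with a bool-before-int check) with a single precomputed feature-to-minimum-tier lookup table, valid because the feature catalogue is a fixed module constant.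
import Mathlib
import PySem

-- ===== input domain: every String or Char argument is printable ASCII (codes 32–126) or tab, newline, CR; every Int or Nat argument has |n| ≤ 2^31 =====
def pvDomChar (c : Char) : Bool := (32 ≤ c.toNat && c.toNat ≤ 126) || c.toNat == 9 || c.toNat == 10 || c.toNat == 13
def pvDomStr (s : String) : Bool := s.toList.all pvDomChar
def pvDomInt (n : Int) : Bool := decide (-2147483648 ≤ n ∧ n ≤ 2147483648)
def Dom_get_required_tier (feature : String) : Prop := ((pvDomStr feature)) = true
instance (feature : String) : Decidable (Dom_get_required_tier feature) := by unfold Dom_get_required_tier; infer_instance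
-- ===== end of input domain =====

-- B replaces A's per-call sort/scan over the fixed feature catalogue with a precomputed
-- feature-to-minimum-tier lookup table (objective: simpler).


-- ===== PORT A =====
-- A dict value in FEATURE_DEFINITIONS is either an int or a bool (Python keeps them distinct
-- under isinstance checks, so we model them as a sum type).
inductive PyVal where
  | vi : Int → PyVal
  | vb : Bool → PyVal
deriving DecidableEq, Repr

-- A feature definition is either a list of tier names or a dict tier → value.
inductive FDef where
  | flist : List String → FDef
  | fdict : PySem.Dict String PyVal → FDef
deriving DecidableEq, Repr

def FEATURE_DEFINITIONS : PySem.Dict String FDef := PySem.Dict.mk [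
  ("aria_manual_sentiment", .flist ["starter", "plus", "family_plus"]),
  ("aria_advanced", .flist ["family_plus"]),
  ("clearfund_fee_exempt", .flist ["plus", "family_plus"]),
  ("quick_accords", .flist ["plus", "family_plus"]),
  ("auto_scheduling", .flist ["plus", "family_plus"]),
  ("custody_dashboard", .flist ["plus", "family_plus"]),
  ("pdf_summaries", .flist ["plus", "family_plus"]),
  ("circle_contacts_limit", .fdict (PySem.Dict.mk
      [("starter", .vi 0), ("plus", .vi 1), ("family_plus", .vi 5)])),
  ("kidcoms_access", .flist ["family_plus"]),
  ("theater_mode", .flist ["family_plus"]),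
  ("parent_voice_call", .flist ["plus", "family_plus"]),
  ("parent_video_call", .flist ["family_plus"]),
  ("court_reporting", .flist ["family_plus"]),
  ("silent_handoff_gps", .flist ["starter", "plus", "family_plus"]),
  ("timebridge_calendar", .flist ["starter", "plus", "family_plus"]),
  ("timebridge_manual_only", .fdict (PySem.Dict.mk
      [("starter", .vb true), ("plus", .vb false), ("family_plus", .vb false)]))]

def TIER_HIERARCHY : PySem.Dict String Int :=
  PySem.Dict.mk [("starter", 0), ("plus", 1), ("family_plus", 2)]

-- A's 'for tier in [...]' loop over the numeric-dict branch, step for step.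
def tierLoopA (d : PySem.Dict String PyVal) : List String → Option String
  | [] => none
  | t :: rest =>
    match d.getD t (.vi 0) with
    | .vb b => if b then some t else tierLoopA d rest
    | .vi n => if n > 0 then some t else tierLoopA d rest

-- A's code after the 'feature not in FEATURE_DEFINITIONS' guard, on the looked-up definition.
def afterLookupA (fd : FDef) : Option String :=
  match fd with
  | .flist l =>
    if l = [] then none
    else (PySem.List.sorted l (fun t => TIER_HIERARCHY.getD t 999) false).head?
  | .fdict d => tierLoopA d ["starter", "plus", "family_plus"]

def get_required_tier (feature : String) : Option String :=
  match FEATURE_DEFINITIONS.get? feature with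
  | none => none
  | some fd => afterLookupA fd

-- ===== PORT B =====
-- B's precomputed table: minimum tier per feature, a module constant in Source B.
def REQUIRED_TIER : PySem.Dict String String := PySem.Dict.mk [
  ("aria_manual_sentiment", "starter"),
  ("aria_advanced", "family_plus"),
  ("clearfund_fee_exempt", "plus"),
  ("quick_accords", "plus"),
  ("auto_scheduling", "plus"),
  ("custody_dashboard", "plus"),
  ("pdf_summaries", "plus"),
  ("circle_contacts_limit", "plus"),
  ("kidcoms_access", "family_plus"),
  ("theater_mode", "family_plus"),
  ("parent_voice_call", "plus"),
  ("parent_video_call", "family_plus"),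
  ("court_reporting", "family_plus"),
  ("silent_handoff_gps", "starter"),
  ("timebridge_calendar", "starter"),
  ("timebridge_manual_only", "starter")]

def get_required_tier_alt (feature : String) : Option String :=
  REQUIRED_TIER.get? feature

-- ===== PRECONDITION & SPEC =====
def Spec_get_required_tier (feature : String) (out : Option String) : Prop := out = get_required_tier_alt feature
instance (feature : String) (out : Option String) : Decidable (Spec_get_required_tier feature out) := by unfold Spec_get_required_tier; infer_instance

-- ===== CLAIM =====
def Claim_equal_get_required_tier : Prop := ∀ (feature : String), Dom_get_required_tier feature → Spec_get_required_tier feature (get_required_tier feature)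

-- ===== LEMMAS AND PROOFS =====

-- Looking a key up in a dict of already-computed values (B) equals looking it up in the
-- source dict and computing afterwards (A), whenever the two assoc lists agree pointwise.
theorem aux (ps : List (String × FDef)) (qs : List (String × String))
    (h : ps.map (fun p => (p.1, afterLookupA p.2)) = qs.map (fun q => (q.1, some q.2)))
    (feature : String) :
    (match (PySem.Dict.mk ps).get? feature with
     | none => none
     | some fd => afterLookupA fd) = (PySem.Dict.mk qs).get? feature := by
  induction ps generalizing qs with
  | nil =>
    cases qs with
    | nil => rfl
    | cons q qt => simp at h
  | cons p pt ih =>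
    cases qs with
    | nil => simp at h
    | cons q qt =>
      simp only [List.map_cons, List.cons.injEq, Prod.mk.injEq] at h
      obtain ⟨⟨hk, hv⟩, ht⟩ := h
      rw [PySem.Dict.get?_mk_cons, PySem.Dict.get?_mk_cons, ← hk]
      by_cases hb : (p.1 == feature) = true
      · simp only [hb, if_true, ← hv]
      · simp only [hb, Bool.false_eq_true, if_false]
        exact ih qt ht

-- ===== VERDICT =====
theorem get_required_tier_spec : Claim_equal_get_required_tier := by
  intro feature _
  unfold Spec_get_required_tier get_required_tier get_required_tier_alt
  unfold FEATURE_DEFINITIONS REQUIRED_TIER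
  exact aux _ _ (by decide) feature
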